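-- pv_equiv track=rewrite | github.com/MrBrantCode/unitest_baseline | mut_generate/mist_train_taco/taco_16891/solution.py | find_most_pronounced_lump
-- ===== SOURCE A (Python) =====
-- def find_most_pronounced_lump(gums):
--     # Extend the list to handle edge cases
--     extended_gums = [gums[0]] + gums + [gums[-1]]
--
--     # Calculate the differential for each index
--     differentials = [
--         extended_gums[i + 1] * 2 - extended_gums[i] - extended_gums[i + 2]
--         for i in range(len(gums))
--     ]
--
--     # Find the maximum differential
--     max_differential = max(differentials)
--
--     # Return the index of the maximum differential if it is unique
--     if differentials.count(max_differential) == 1: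
--         return differentials.index(max_differential)
--     else:
--         return -1
-- ===== SOURCE B (Python) =====
-- def find_most_pronounced_lump(gums):
--     n = len(gums)
--     best_val = None
--     best_idx = -1
--     count = 0
--     for i in range(n):
--         left = gums[i - 1] if i > 0 else gums[0]
--         right = gums[i + 1] if i < n - 1 else gums[n - 1]
--         d = 2 * gums[i] - left - right
--         if best_val is None or d > best_val:
--             best_val, best_idx, count = d, i, 1
--         elif d == best_val:
--             count += 1
--     return best_idx if count == 1 else -1
-- ===== Notes on version B (the rewrite author's own statement) =====
-- stated objective: alternative
-- what changed: B replaces A's four passes (build a padded copy, build the differentials list, max(), count(), index()) by one streaming loop that computes each second-difference inline and maintains a running (best value, first index, multiplicity) triple.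
import Mathlib
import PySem

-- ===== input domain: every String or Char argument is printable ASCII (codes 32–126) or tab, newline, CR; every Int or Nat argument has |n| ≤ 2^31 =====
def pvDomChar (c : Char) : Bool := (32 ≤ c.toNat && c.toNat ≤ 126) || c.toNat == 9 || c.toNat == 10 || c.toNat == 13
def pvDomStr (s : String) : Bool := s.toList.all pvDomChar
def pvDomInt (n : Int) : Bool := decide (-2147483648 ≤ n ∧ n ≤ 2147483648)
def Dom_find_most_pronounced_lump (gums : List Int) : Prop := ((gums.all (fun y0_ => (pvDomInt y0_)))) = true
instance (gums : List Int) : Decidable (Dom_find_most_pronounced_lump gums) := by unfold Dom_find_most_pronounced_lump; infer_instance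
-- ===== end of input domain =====

-- B replaces A's four passes (padded copy, differentials list, max, count, index) by one
-- streaming loop maintaining a running (best value, first index, multiplicity) triple.


-- ===== PORT A =====
def find_most_pronounced_lump (gums : List Int) : Int :=
  -- extended_gums = [gums[0]] + gums + [gums[-1]]   (gums[0]/gums[-1] raise on []; Pre_ excludes it)
  let extended_gums : List Int :=
    [(PySem.List.pyGet? gums 0).getD 0] ++ gums ++ [(PySem.List.pyGet? gums (-1)).getD 0]
  -- differentials = [extended[i+1]*2 - extended[i] - extended[i+2] for i in range(len(gums))]
  let differentials : List Int :=
    (PySem.List.pyRange 0 gums.length 1).map (fun i =>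
      PySem.List.pyGetD extended_gums (i + 1) 0 * 2
        - PySem.List.pyGetD extended_gums i 0
        - PySem.List.pyGetD extended_gums (i + 2) 0)
  -- max_differential = max(differentials)   (raises on []; only when gums = [], outside Pre_)
  match PySem.List.max? differentials (fun x => x) with
  | none => -1
  | some max_differential =>
    if PySem.List.count differentials max_differential = 1 then
      (((PySem.List.index? differentials max_differential).getD 0 : Nat) : Int)
    else
      -1

-- ===== PORT B =====
def find_most_pronounced_lump_alt (gums : List Int) : Int :=
  let n : Int := gums.length
  let st :=
    (List.range gums.length).foldl
      (fun (st : Option Int × Int × Int) (i : Nat) =>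
        let left := if (i : Int) > 0 then PySem.List.pyGetD gums ((i : Int) - 1) 0
                    else PySem.List.pyGetD gums 0 0
        let right := if (i : Int) < n - 1 then PySem.List.pyGetD gums ((i : Int) + 1) 0
                     else PySem.List.pyGetD gums (n - 1) 0
        let d := 2 * PySem.List.pyGetD gums (i : Int) 0 - left - right
        match st with
        | (none, _, _) => (some d, (i : Int), 1)
        | (some b, bi, c) =>
          if d > b then (some d, (i : Int), 1)
          else if d = b then (some b, bi, c + 1)
          else (some b, bi, c))
      (none, -1, 0)
  if st.2.2 = 1 then st.2.1 else -1

-- ===== PRECONDITION & SPEC =====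
-- Pre_ excludes only the empty list, on which A raises IndexError at gums[0].
def Pre_find_most_pronounced_lump (gums : List Int) : Prop := gums ≠ []
instance (gums : List Int) : Decidable (Pre_find_most_pronounced_lump gums) := by
  unfold Pre_find_most_pronounced_lump; infer_instance
def pvWitness_find_most_pronounced_lump : List Int := [1, 3, 1]

def Spec_find_most_pronounced_lump (gums : List Int) (out : Int) : Prop :=
  out = find_most_pronounced_lump_alt gums
instance (gums : List Int) (out : Int) : Decidable (Spec_find_most_pronounced_lump gums out) := by
  unfold Spec_find_most_pronounced_lump; infer_instance

-- ===== CLAIM (what is proved, stated in full; the proofs are below) =====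
def Claim_equal_find_most_pronounced_lump : Prop :=
  ∀ (gums : List Int), Dom_find_most_pronounced_lump gums →
    Pre_find_most_pronounced_lump gums →
    Spec_find_most_pronounced_lump gums (find_most_pronounced_lump gums)

-- ===== LEMMAS AND PROOFS =====

-- the value B computes at index i (inline second difference)
def dB (gums : List Int) (i : Nat) : Int :=
  let n : Int := gums.length
  let left := if (i : Int) > 0 then PySem.List.pyGetD gums ((i : Int) - 1) 0
              else PySem.List.pyGetD gums 0 0
  let right := if (i : Int) < n - 1 then PySem.List.pyGetD gums ((i : Int) + 1) 0
               else PySem.List.pyGetD gums (n - 1) 0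
  2 * PySem.List.pyGetD gums (i : Int) 0 - left - right

-- B's step, on the precomputed value
def step2 (st : Option Int × Int × Int) (v : Int) (i : Int) : Option Int × Int × Int :=
  match st with
  | (none, _, _) => (some v, i, 1)
  | (some b, bi, c) =>
    if v > b then (some v, i, 1)
    else if v = b then (some b, bi, c + 1)
    else (some b, bi, c)

def scanB : List Int → Int → (Option Int × Int × Int) → Option Int × Int × Int
  | [], _, st => st
  | v :: vs, i, st => scanB vs (i + 1) (step2 st v i)

theorem stepB_eq (gums : List Int) :
    (fun (st : Option Int × Int × Int) (i : Nat) =>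
        let left := if (i : Int) > 0 then PySem.List.pyGetD gums ((i : Int) - 1) 0
                    else PySem.List.pyGetD gums 0 0
        let right := if (i : Int) < (gums.length : Int) - 1 then PySem.List.pyGetD gums ((i : Int) + 1) 0
                     else PySem.List.pyGetD gums ((gums.length : Int) - 1) 0
        let d := 2 * PySem.List.pyGetD gums (i : Int) 0 - left - right
        match st with
        | (none, _, _) => (some d, (i : Int), 1)
        | (some b, bi, c) =>
          if d > b then (some d, (i : Int), 1)
          else if d = b then (some b, bi, c + 1)
          else (some b, bi, c))
      = fun st i => step2 st (dB gums i) (i : Int) := by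
  funext st i
  rfl

theorem foldl_range'_scanB (gums : List Int) :
    ∀ (m a : Nat) (st : Option Int × Int × Int),
    (List.range' a m).foldl (fun st i => step2 st (dB gums i) (i : Int)) st
      = scanB ((List.range' a m).map (dB gums)) (a : Int) st := by
  intro m
  induction m with
  | zero => intro a st; simp [scanB]
  | succ k ih =>
    intro a st
    rw [List.range'_succ]
    simp only [List.foldl_cons, List.map_cons, scanB]
    rw [ih (a + 1)]
    norm_num

-- the main invariant of B's loop
theorem scanB_inv :
    ∀ (vs : List Int) (b bi c i : Int),
    scanB vs i (some b, bi, c) =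
      (some (vs.foldl max b),
       if b < vs.foldl max b then i + ((vs.idxOf (vs.foldl max b) : Nat) : Int) else bi,
       if b < vs.foldl max b then ((vs.count (vs.foldl max b) : Nat) : Int)
       else c + ((vs.count b : Nat) : Int)) := by
  intro vs
  induction vs with
  | nil => intro b bi c i; simp [scanB]
  | cons v vs ih =>
    intro b bi c i
    have hle : ∀ (a : Int), a ≤ vs.foldl max a := fun a => (PySem.List.le_foldl_max vs a).1
    by_cases hgt : v > b
    · have hmax : max b v = v := by omega
      simp only [scanB, step2, if_pos hgt, List.foldl_cons, hmax, ih]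
      have hvM : v ≤ vs.foldl max v := hle v
      have hbM : b < vs.foldl max v := lt_of_lt_of_le hgt hvM
      by_cases hv : v = vs.foldl max v
      · rw [← hv]
        simp [List.idxOf_cons_self, List.count_cons_self]
        omega
      · have hvlt : v < vs.foldl max v := lt_of_le_of_ne hvM hv
        have hne : (v == vs.foldl max v) = false := by simp [hv]
        simp [if_pos hbM, if_pos hvlt, List.idxOf_cons, hne, List.count_cons, hv]
        omega
    · by_cases heq : v = b
      · subst heq
        simp only [scanB, step2, if_neg hgt, List.foldl_cons, max_self, if_true]
        rw [ih]
        by_cases hbM : v < vs.foldl max v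
        · have hne : (v == vs.foldl max v) = false := by simp; omega
          simp [if_pos hbM, List.idxOf_cons, hne, List.count_cons]
          omega
        · have hM : vs.foldl max v = v := le_antisymm (by omega) (hle v)
          simp [hM, List.count_cons_self]
          omega
      · have hlt : v < b := by omega
        have hmax : max b v = b := by omega
        simp only [scanB, step2, if_neg hgt, if_neg heq, List.foldl_cons, hmax, ih]
        by_cases hbM : b < vs.foldl max b
        · have hvne : v ≠ vs.foldl max b := by have := hle b; omega
          have hne : (v == vs.foldl max b) = false := by simp [hvne]
          simp [if_pos hbM, List.idxOf_cons, hne, List.count_cons, hvne]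
          omega
        · have hvne : v ≠ b := heq
          simp [if_neg hbM, List.count_cons, hvne]

-- index? on a list containing the value
theorem idxOf?_eq_some_idxOf (l : List Int) (v : Int) (h : v ∈ l) :
    l.idxOf? v = some (l.idxOf v) := by
  induction l with
  | nil => cases h
  | cons a l ih =>
    by_cases hav : a = v
    · subst hav; simp [List.idxOf?_cons, List.idxOf_cons_self]
    · have hne : (a == v) = false := by simp [hav]
      have hm : v ∈ l := by cases h with
        | head => exact absurd rfl hav
        | tail _ h' => exact h'
      simp [List.idxOf?_cons, List.idxOf_cons, hne, ih hm]

-- A's differential value at index k, for nonempty gums, equals B's inline value dB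
theorem diff_eq (g : List Int) (hne : g ≠ []) (k : Nat) (hk : k < g.length) :
    PySem.List.pyGetD ([(PySem.List.pyGet? g 0).getD 0] ++ g ++
        [(PySem.List.pyGet? g (-1)).getD 0]) ((k : Int) + 1) 0 * 2
      - PySem.List.pyGetD ([(PySem.List.pyGet? g 0).getD 0] ++ g ++
        [(PySem.List.pyGet? g (-1)).getD 0]) ((k : Int)) 0
      - PySem.List.pyGetD ([(PySem.List.pyGet? g 0).getD 0] ++ g ++
        [(PySem.List.pyGet? g (-1)).getD 0]) ((k : Int) + 2) 0
      = dB g k := by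
  have hzero : (PySem.List.pyGet? g 0).getD 0 = g.getD 0 0 := by
    rw [PySem.List.pyGet?_zero, ← List.getD_eq_getElem?_getD]
  have hlast : (PySem.List.pyGet? g (-1)).getD 0 = g.getLast hne := by
    rw [PySem.List.pyGet?_neg_one]
    simp [List.getLast?_eq_getLast_of_ne_nil hne]
  rw [hzero, hlast]
  have hx : [g.getD 0 0] ++ g ++ [g.getLast hne] = g.getD 0 0 :: (g ++ [g.getLast hne]) := by
    simp
  rw [hx]
  have c1 : ((k : Int) + 1) = ((k + 1 : Nat) : Int) := by push_cast; ring
  have c2 : ((k : Int) + 2) = ((k + 2 : Nat) : Int) := by push_cast; ring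
  have e1 : PySem.List.pyGetD (g.getD 0 0 :: (g ++ [g.getLast hne])) ((k : Int) + 1) 0
      = g.getD k 0 := by
    rw [c1, PySem.List.pyGetD_natCast, List.getD_cons_succ, List.getD_append _ _ _ _ hk]
  have e0 : PySem.List.pyGetD (g.getD 0 0 :: (g ++ [g.getLast hne])) ((k : Int)) 0
      = (if k = 0 then g.getD 0 0 else g.getD (k - 1) 0) := by
    rw [PySem.List.pyGetD_natCast]
    cases k with
    | zero => simp
    | succ m =>
      simp only [Nat.succ_ne_zero, if_neg, not_false_iff, Nat.add_sub_cancel]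
      rw [List.getD_cons_succ, List.getD_append _ _ _ _ (by omega)]
  have e2 : PySem.List.pyGetD (g.getD 0 0 :: (g ++ [g.getLast hne])) ((k : Int) + 2) 0
      = (if k + 1 < g.length then g.getD (k + 1) 0 else g.getLast hne) := by
    rw [c2, PySem.List.pyGetD_natCast, List.getD_cons_succ]
    by_cases h2 : k + 1 < g.length
    · rw [if_pos h2, List.getD_append _ _ _ _ h2]
    · rw [if_neg h2, List.getD_append_right _ _ _ _ (by omega),
        show k + 1 - g.length = 0 from by omega]
      simp
  rw [e1, e0, e2]
  have bk : PySem.List.pyGetD g ((k : Int)) 0 = g.getD k 0 := by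
    rw [PySem.List.pyGetD_natCast]
  have bleft : (if (k : Int) > 0 then PySem.List.pyGetD g ((k : Int) - 1) 0
      else PySem.List.pyGetD g 0 0)
      = (if k = 0 then g.getD 0 0 else g.getD (k - 1) 0) := by
    by_cases hk0 : k = 0
    · subst hk0
      simp [PySem.List.pyGetD_zero]
    · have hp : (k : Int) > 0 := by omega
      have hc : ((k : Int) - 1) = ((k - 1 : Nat) : Int) := by omega
      rw [if_pos hp, if_neg hk0, hc, PySem.List.pyGetD_natCast]
  have bright : (if (k : Int) < (g.length : Int) - 1 then PySem.List.pyGetD g ((k : Int) + 1) 0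
      else PySem.List.pyGetD g ((g.length : Int) - 1) 0)
      = (if k + 1 < g.length then g.getD (k + 1) 0 else g.getLast hne) := by
    by_cases h2 : k + 1 < g.length
    · have hp : (k : Int) < (g.length : Int) - 1 := by omega
      rw [if_pos hp, if_pos h2, c1, PySem.List.pyGetD_natCast]
    · have hp : ¬ ((k : Int) < (g.length : Int) - 1) := by omega
      have hlpos : 0 < g.length := by
        cases g with
        | nil => exact absurd rfl hne
        | cons a l => simp
      have hc : ((g.length : Int) - 1) = ((g.length - 1 : Nat) : Int) := by omega
      rw [if_neg hp, if_neg h2, hc, PySem.List.pyGetD_natCast]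
      rw [List.getD_eq_getElem?_getD, List.getElem?_eq_getElem (by omega)]
      simp [List.getLast_eq_getElem]
  simp only [dB]
  rw [bk, bleft, bright]
  ring

-- ===== VERDICT (by name: the statement is the Claim_ definition above) =====
theorem find_most_pronounced_lump_spec : Claim_equal_find_most_pronounced_lump := by
  intro gums _ hpre
  unfold Spec_find_most_pronounced_lump
  cases gums with
  | nil => exact absurd rfl hpre
  | cons x t =>
    unfold find_most_pronounced_lump find_most_pronounced_lump_alt
    simp only [stepB_eq, List.range_eq_range', foldl_range'_scanB, Nat.cast_zero]
    -- both sides are about the same list of differentials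
    have hds : (PySem.List.pyRange 0 ((x :: t).length : Int) 1).map
          (fun i =>
            PySem.List.pyGetD ([(PySem.List.pyGet? (x :: t) 0).getD 0] ++ (x :: t) ++
                [(PySem.List.pyGet? (x :: t) (-1)).getD 0]) (i + 1) 0 * 2
              - PySem.List.pyGetD ([(PySem.List.pyGet? (x :: t) 0).getD 0] ++ (x :: t) ++
                [(PySem.List.pyGet? (x :: t) (-1)).getD 0]) i 0
              - PySem.List.pyGetD ([(PySem.List.pyGet? (x :: t) 0).getD 0] ++ (x :: t) ++
                [(PySem.List.pyGet? (x :: t) (-1)).getD 0]) (i + 2) 0)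
        = (List.range' 0 (x :: t).length).map (dB (x :: t)) := by
      rw [PySem.List.pyRange_one, List.map_map]
      simp only [Int.sub_zero, Int.toNat_natCast, List.range_eq_range']
      apply List.map_congr_left
      intro k hkmem
      have hk : k < (x :: t).length := by
        have := List.mem_range'_1.mp hkmem
        omega
      simpa using diff_eq (x :: t) (by simp) k hk
    rw [hds]
    -- peel the first differential
    have hlen : (x :: t).length = t.length + 1 := by simp
    rw [hlen, List.range'_succ, List.map_cons]
    set v : Int := dB (x :: t) 0 with hv
    set vs : List Int := (List.range' 1 t.length).map (dB (x :: t)) with hvs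
    set M : Int := vs.foldl max v with hM
    have hscan : scanB (v :: vs) 0 (none, -1, 0)
        = (some M,
           if v < M then 0 + 1 + ((vs.idxOf M : Nat) : Int) else 0,
           if v < M then ((vs.count M : Nat) : Int) else 1 + ((vs.count v : Nat) : Int)) := by
      show scanB vs (0 + 1) (step2 (none, -1, 0) v 0) = _
      rw [show step2 (none, -1, 0) v 0 = (some v, 0, 1) from rfl, scanB_inv]
    rw [hscan, PySem.List.max?_id_cons, ← hM]
    dsimp only
    have hvM : v ≤ M := (PySem.List.le_foldl_max vs v).1
    by_cases hlt : v < M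
    · -- the maximum occurs in the tail
      have hMvs : M ∈ vs := by
        rcases PySem.List.foldl_max_mem vs v with h | h
        · omega
        · exact h
      have hvneM : (v == M) = false := by simp; omega
      rw [PySem.List.count_eq, List.count_cons, hvneM]
      rw [PySem.List.index?_eq_idxOf?, List.idxOf?_cons, hvneM]
      rw [idxOf?_eq_some_idxOf vs M hMvs]
      simp only [if_pos hlt, Bool.false_eq_true, if_false, Option.getD_some, Nat.add_zero,
        Option.map_some]
      by_cases hc : List.count M vs = 1
      · rw [if_pos (by omega), if_pos (by exact_mod_cast hc)]
        push_cast
        ring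
      · rw [if_neg (by omega), if_neg (by exact_mod_cast hc)]
    · -- the head is the maximum
      have hMv : M = v := le_antisymm (by omega) hvM
      rw [hMv]
      have hvv : (v == v) = true := by simp
      rw [PySem.List.count_eq, List.count_cons, hvv]
      rw [PySem.List.index?_eq_idxOf?, List.idxOf?_cons, hvv]
      simp only [lt_self_iff_false, if_false, if_true, Option.getD_some, Nat.cast_zero]
      by_cases hc : List.count v vs = 0
      · rw [if_pos (show List.count v vs + 1 = 1 by omega),
          if_pos (show (1 : Int) + ↑(List.count v vs) = 1 by rw [hc]; simp)]
      · rw [if_neg (show ¬ List.count v vs + 1 = 1 by omega),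
          if_neg (show ¬ (1 : Int) + ↑(List.count v vs) = 1 from fun h => hc (by omega))]
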